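-- pv_equiv track=rewrite | github.com/clarkyang37th/HackNYU-Themis | hack_nyu_tf_idf_and_cos_sim.py | abstract_tf
-- ===== SOURCE A (Python) =====
-- def abstract_tf(abstract_occurence_dic,total_docs):
--     abstract_tf_list = []
--     for count in range(total_docs):
--         dic = {}
--         for key in abstract_occurence_dic:
--             term = abstract_occurence_dic[key][count]
--             if term > 0:
--                 dic[key] = term
--         abstract_tf_list.append(dic)
--     return abstract_tf_list
-- ===== SOURCE B (Python) =====
-- def abstract_tf(abstract_occurence_dic, total_docs):
--     # Different algorithm: flatten the table into one flat event list
--     # (doc, pos, key, count) in a single pass over the terms, stable-sort the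
--     # events by (doc, pos), then build the answer in one linear sweep that
--     # groups consecutive events of the same document.
--     events = [(i, pos, key, counts[i])
--               for pos, (key, counts) in enumerate(abstract_occurence_dic.items())
--               for i in range(total_docs)
--               if counts[i] > 0]
--     events.sort(key=lambda e: (e[0], e[1]))
--     result = []
--     j = 0
--     for i in range(total_docs):
--         dic = {}
--         while j < len(events) and events[j][0] == i:
--             dic[events[j][2]] = events[j][3]
--             j += 1
--         result.append(dic)
--     return result
-- ===== Notes on version B (the rewrite author's own statement) =====
-- stated objective: alternative
-- what changed: Replaces the nested per-document dict rebuilding with a flatten/sort/sweep pipeline: one pass flattens the table into (doc, pos, key, count) events with positive counts, a stable sort orders them by (doc, pos), and a single linear sweep with a pointer groups consecutive events of the same document into its dict.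
import Mathlib
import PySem

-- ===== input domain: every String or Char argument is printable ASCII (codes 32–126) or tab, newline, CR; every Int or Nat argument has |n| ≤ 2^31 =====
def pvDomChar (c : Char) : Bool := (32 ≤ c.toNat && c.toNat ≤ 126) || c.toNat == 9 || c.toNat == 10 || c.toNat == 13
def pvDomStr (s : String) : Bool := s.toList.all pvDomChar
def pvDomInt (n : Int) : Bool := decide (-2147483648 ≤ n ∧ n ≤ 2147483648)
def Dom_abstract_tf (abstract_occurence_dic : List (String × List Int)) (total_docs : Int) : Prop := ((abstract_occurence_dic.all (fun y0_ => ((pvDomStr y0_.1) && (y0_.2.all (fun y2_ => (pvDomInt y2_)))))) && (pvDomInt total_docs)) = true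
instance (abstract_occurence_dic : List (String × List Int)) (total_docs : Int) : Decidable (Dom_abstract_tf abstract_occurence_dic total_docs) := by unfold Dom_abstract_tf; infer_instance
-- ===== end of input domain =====

-- B replaces the nested per-document rebuild with a flatten/sort/sweep pipeline
-- (flat event list, stable sort by (doc, pos), one linear grouping sweep):
-- an alternative algorithm of similar cost, proved to return the same value.


-- ===== PORT A =====
-- doc-major: for each count in range(total_docs), build that document's dict by a
-- full scan over the terms, and append it to the output list.
def abstract_tf (abstract_occurence_dic : List (String × List Int)) (total_docs : Int) : List (List (String × Int)) :=
  (PySem.List.pyRange 0 total_docs 1).foldl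
    (fun abstract_tf_list count =>
      abstract_tf_list ++
        [(abstract_occurence_dic.foldl
            (fun dic kv =>
              let term := PySem.List.pyGetD kv.2 count 0   -- abstract_occurence_dic[key][count]; Pre_ keeps count in range
              if term > 0 then dic.insert kv.1 term else dic)
            PySem.Dict.empty).items])
    []

-- ===== PORT B =====
-- the flat event list: (i, pos, key, counts[i]) for each term (at position pos)
-- and each document i with counts[i] > 0  (the comprehension of Source B)
def pvEvents (abstract_occurence_dic : List (String × List Int)) (total_docs : Int) : List (Int × Int × String × Int) :=
  (PySem.List.enumerate abstract_occurence_dic).flatMap (fun pe =>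
    (PySem.List.pyRange 0 total_docs 1).filterMap (fun i =>
      if 0 < PySem.List.pyGetD pe.2.2 i 0 then   -- counts[i]; Pre_ keeps i in range
        some (i, pe.1, pe.2.1, PySem.List.pyGetD pe.2.2 i 0)
      else none))

-- the inner while loop of Source B: consume events while events[j][0] == i,
-- inserting them into dic; return (dic, remaining events)
def pvSweep (i : Int) (dic : PySem.Dict String Int) :
    List (Int × Int × String × Int) → PySem.Dict String Int × List (Int × Int × String × Int)
  | [] => (dic, [])
  | e :: rest => if e.1 == i then pvSweep i (dic.insert e.2.2.1 e.2.2.2) rest else (dic, e :: rest)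

-- flatten → stable sort by (doc, pos) → one grouping sweep over the documents
def abstract_tf_alt (abstract_occurence_dic : List (String × List Int)) (total_docs : Int) : List (List (String × Int)) :=
  let events := PySem.List.sorted2 (pvEvents abstract_occurence_dic total_docs) (fun e => e.1) (fun e => e.2.1)
  ((PySem.List.pyRange 0 total_docs 1).foldl
    (fun st i =>
      let r := pvSweep i PySem.Dict.empty st.2
      (st.1 ++ [r.1.items], r.2))
    (([] : List (List (String × Int))), events)).1

-- ===== PRECONDITION & SPEC =====
-- Pre_ excludes exactly the inputs where Python A raises IndexError: total_docs > 0 while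
-- some term's count list is shorter than total_docs (then abstract_occurence_dic[key][count] raises).
def Pre_abstract_tf (abstract_occurence_dic : List (String × List Int)) (total_docs : Int) : Prop :=
  total_docs ≤ 0 ∨ ∀ kv ∈ abstract_occurence_dic, total_docs ≤ (kv.2.length : Int)
instance (abstract_occurence_dic : List (String × List Int)) (total_docs : Int) : Decidable (Pre_abstract_tf abstract_occurence_dic total_docs) := by unfold Pre_abstract_tf; infer_instance
def pvWitness_abstract_tf : (List (String × List Int)) × Int := ([("a", [1, 0]), ("b", [2, 3])], 2)

def Spec_abstract_tf (abstract_occurence_dic : List (String × List Int)) (total_docs : Int) (out : List (List (String × Int))) : Prop := out = abstract_tf_alt abstract_occurence_dic total_docs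
instance (abstract_occurence_dic : List (String × List Int)) (total_docs : Int) (out : List (List (String × Int))) : Decidable (Spec_abstract_tf abstract_occurence_dic total_docs out) := by unfold Spec_abstract_tf; infer_instance

-- ===== CLAIM (what is proved, stated in full; the proofs are below) =====
def Claim_equal_abstract_tf : Prop := ∀ (abstract_occurence_dic : List (String × List Int)) (total_docs : Int), Dom_abstract_tf abstract_occurence_dic total_docs → Pre_abstract_tf abstract_occurence_dic total_docs → Spec_abstract_tf abstract_occurence_dic total_docs (abstract_tf abstract_occurence_dic total_docs)

-- ===== LEMMAS AND PROOFS =====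

-- the per-document slice of the event list, in term (pos) order
def pvBlock (d : List (String × List Int)) (i : Int) : List (Int × Int × String × Int) :=
  (PySem.List.enumerate d).filterMap (fun pe =>
    if 0 < PySem.List.pyGetD pe.2.2 i 0 then
      some (i, pe.1, pe.2.1, PySem.List.pyGetD pe.2.2 i 0)
    else none)

-- the event list rearranged doc-major: what the stable sort produces
def pvYs (d : List (String × List Int)) (n : Int) : List (Int × Int × String × Int) :=
  (PySem.List.pyRange 0 n 1).flatMap (pvBlock d)

def pvKey (L : Int) (e : Int × Int × String × Int) : Int := e.1 * L + e.2.1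

theorem pv_insertBy_congr {α : Type} (before before' : α → α → Bool) (x : α) :
    ∀ ys : List α, (∀ y ∈ ys, before x y = before' x y) →
      PySem.List.insertBy before x ys = PySem.List.insertBy before' x ys := by
  intro ys
  induction ys with
  | nil => intro _; rfl
  | cons y ys ih =>
    intro h
    simp only [PySem.List.insertBy]
    rw [h y (by simp)]
    by_cases hb : before' x y = true
    · simp [hb]
    · simp only [hb]
      rw [ih (fun z hz => h z (by simp [hz]))]

theorem pv_foldl_insertBy_congr {α : Type} (before before' : α → α → Bool) (S : List α) :
    (∀ a ∈ S, ∀ b ∈ S, before a b = before' a b) →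
    ∀ (xs acc : List α), (∀ a ∈ xs, a ∈ S) → (∀ a ∈ acc, a ∈ S) →
      xs.foldl (fun acc x => PySem.List.insertBy before x acc) acc
        = xs.foldl (fun acc x => PySem.List.insertBy before' x acc) acc := by
  intro hS xs
  induction xs with
  | nil => intro acc _ _; rfl
  | cons x xs ih =>
    intro acc hxs hacc
    have hx : x ∈ S := hxs x (by simp)
    simp only [List.foldl_cons]
    rw [pv_insertBy_congr before before' x acc (fun y hy => hS x hx y (hacc y hy))]
    exact ih _ (fun a ha => hxs a (by simp [ha]))
      (fun a ha => by
        rcases (PySem.List.mem_insertBy before' x a acc).mp ha with h | h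
        · exact h ▸ hx
        · exact hacc a h)

-- sorted2 by the lexicographic key (e.1, e.2.1) agrees with sorted by a single Int key f
-- as soon as the two comparisons agree on the elements of the list being sorted
theorem pv_sorted2_eq_sorted (xs : List (Int × Int × String × Int)) (f : Int × Int × String × Int → Int)
    (h : ∀ a ∈ xs, ∀ b ∈ xs,
      (decide (a.1 < b.1) || (!decide (b.1 < a.1) && decide (a.2.1 < b.2.1))) = decide (f a < f b)) :
    PySem.List.sorted2 xs (fun e => e.1) (fun e => e.2.1) = PySem.List.sorted xs f := by
  rw [PySem.List.sorted_eq_foldl_insertBy]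
  simp only [PySem.List.sorted2, if_neg (by decide : ¬ (false = true))]
  exact pv_foldl_insertBy_congr _ _ xs h xs [] (fun a ha => ha) (by simp)

-- membership facts about blocks
theorem pv_mem_pvBlock {d : List (String × List Int)} {i : Int} {e : Int × Int × String × Int}
    (he : e ∈ pvBlock d i) : e.1 = i ∧ 0 ≤ e.2.1 ∧ e.2.1 < (d.length : Int) := by
  simp only [pvBlock, List.mem_filterMap] at he
  obtain ⟨pe, hpe, hsome⟩ := he
  split_ifs at hsome with hpos
  · obtain ⟨k, hk, rfl⟩ := (PySem.List.mem_enumerate_iff _ _ _).mp hpe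
    cases hsome
    refine ⟨rfl, by simp, by simp; omega⟩

-- the event list is a permutation of its doc-major rearrangement
theorem pv_events_perm (d : List (String × List Int)) (n : Int) :
    (pvEvents d n).Perm (pvYs d n) := by
  rw [← Multiset.coe_eq_coe]
  simp only [pvEvents, pvYs, pvBlock, List.filterMap_eq_flatMap_toList, ← Multiset.coe_bind]
  exact Multiset.bind_bind _ _

-- the doc-major rearrangement is strictly increasing under the combined key
theorem pv_ys_pairwise (d : List (String × List Int)) (n : Int) :
    (pvYs d n).Pairwise (fun a b => pvKey (d.length : Int) a < pvKey (d.length : Int) b) := by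
  rw [pvYs, List.pairwise_flatMap]
  constructor
  · intro i _
    rw [pvBlock, List.pairwise_filterMap]
    refine (PySem.List.pairwise_lt_enumerate d 0).imp ?_
    intro a b hab x hx y hy
    split_ifs at hx hy with h1 h2
    · cases hx; cases hy
      simp only [pvKey]
      omega
  · refine (PySem.List.pairwise_lt_pyRange_one 0 n).imp ?_
    intro i j hij x hx y hy
    obtain ⟨hx1, hx2, hx3⟩ := pv_mem_pvBlock hx
    obtain ⟨hy1, hy2, hy3⟩ := pv_mem_pvBlock hy
    simp only [pvKey, hx1, hy1]
    nlinarith [mul_le_mul_of_nonneg_right (by omega : i + 1 ≤ j) (by omega : (0:Int) ≤ (d.length : Int))]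

theorem pv_mem_pvEvents {d : List (String × List Int)} {n : Int} {e : Int × Int × String × Int}
    (he : e ∈ pvEvents d n) : 0 ≤ e.2.1 ∧ e.2.1 < (d.length : Int) := by
  have : e ∈ pvYs d n := (pv_events_perm d n).mem_iff.mp he
  rw [pvYs, List.mem_flatMap] at this
  obtain ⟨i, _, hb⟩ := this
  exact (pv_mem_pvBlock hb).2

-- the stable sort of the event list IS the doc-major rearrangement
theorem pv_sorted_events (d : List (String × List Int)) (n : Int) :
    PySem.List.sorted2 (pvEvents d n) (fun e => e.1) (fun e => e.2.1) = pvYs d n := by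
  rw [pv_sorted2_eq_sorted (pvEvents d n) (pvKey (d.length : Int)) ?hagree]
  · exact PySem.List.sorted_eq_of_perm_of_pairwise_lt _ _ _
      (pv_events_perm d n).symm (pv_ys_pairwise d n)
  · intro a ha b hb
    obtain ⟨ha1, ha2⟩ := pv_mem_pvEvents ha
    obtain ⟨hb1, hb2⟩ := pv_mem_pvEvents hb
    simp only [pvKey]
    rcases lt_trichotomy a.1 b.1 with h | h | h
    · have : a.1 * (d.length : Int) + a.2.1 < b.1 * (d.length : Int) + b.2.1 := by
        nlinarith [mul_le_mul_of_nonneg_right (by omega : a.1 + 1 ≤ b.1) (by omega : (0:Int) ≤ (d.length : Int))]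
      simp [h, this, not_lt.mpr (le_of_lt h)]
    · simp only [h, lt_self_iff_false, decide_false, Bool.false_or, Bool.not_false, Bool.true_and]
      have : a.2.1 < b.2.1 ↔ a.1 * (d.length : Int) + a.2.1 < b.1 * (d.length : Int) + b.2.1 := by
        rw [h]; omega
      simp [this]
    · have : b.1 * (d.length : Int) + b.2.1 < a.1 * (d.length : Int) + a.2.1 := by
        nlinarith [mul_le_mul_of_nonneg_right (by omega : b.1 + 1 ≤ a.1) (by omega : (0:Int) ≤ (d.length : Int))]
      simp [h, not_lt.mpr (le_of_lt h), not_lt.mpr (le_of_lt this)]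

-- the sweep consumes exactly the leading block of events labelled i
theorem pv_sweep_block (i : Int) :
    ∀ (bs : List (Int × Int × String × Int)) (dic : PySem.Dict String Int)
      (rest : List (Int × Int × String × Int)),
      (∀ e ∈ bs, e.1 = i) → (∀ e ∈ rest.head?, e.1 ≠ i) →
      pvSweep i dic (bs ++ rest)
        = (bs.foldl (fun dic e => dic.insert e.2.2.1 e.2.2.2) dic, rest) := by
  intro bs
  induction bs with
  | nil =>
    intro dic rest _ hrest
    cases rest with
    | nil => rfl
    | cons e r =>
      have : e.1 ≠ i := hrest e (by simp)
      simp [pvSweep, this]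
  | cons e bs ih =>
    intro dic rest hbs hrest
    have he : e.1 = i := hbs e (by simp)
    simp only [List.cons_append, pvSweep, he, BEq.rfl, if_true, List.foldl_cons]
    exact ih _ rest (fun x hx => hbs x (by simp [hx])) hrest

-- the outer sweep loop over a duplicate-free document list consumes block by block
theorem pv_sweep_fold (block : Int → List (Int × Int × String × Int)) :
    ∀ (ks : List Int) (acc : List (List (String × Int))),
      ks.Pairwise (· ≠ ·) → (∀ k ∈ ks, ∀ e ∈ block k, e.1 = k) →
      ks.foldl
          (fun st i =>
            let r := pvSweep i PySem.Dict.empty st.2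
            (st.1 ++ [r.1.items], r.2))
          (acc, ks.flatMap block)
        = (acc ++ ks.map (fun k =>
            ((block k).foldl (fun dic e => dic.insert e.2.2.1 e.2.2.2) PySem.Dict.empty).items), []) := by
  intro ks
  induction ks with
  | nil => intro acc _ _; simp
  | cons k ks ih =>
    intro acc hnd hbl
    simp only [List.flatMap_cons, List.foldl_cons]
    rw [pv_sweep_block k (block k) PySem.Dict.empty (ks.flatMap block)
      (fun e he => hbl k (by simp) e he)
      (fun e he => by
        have hmem : e ∈ ks.flatMap block := List.mem_of_mem_head? he
        rw [List.mem_flatMap] at hmem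
        obtain ⟨k', hk', hek'⟩ := hmem
        have : e.1 = k' := hbl k' (by simp [hk']) e hek'
        have hkk' : k ≠ k' := (List.pairwise_cons.mp hnd).1 k' hk'
        rw [this]; exact fun h => hkk' h.symm)]
    have h2 := ih (acc ++ [((block k).foldl (fun dic e => dic.insert e.2.2.1 e.2.2.2) PySem.Dict.empty).items])
      (List.pairwise_cons.mp hnd).2 (fun k' hk' => hbl k' (by simp [hk']))
    simp only [h2, List.map_cons, List.append_assoc, List.singleton_append]

-- a filterMap through an if-then-some is a map over a filter
theorem pv_filterMap_if {α β : Type} (p : α → Prop) [DecidablePred p] (f : α → β) :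
    ∀ l : List α, l.filterMap (fun a => if p a then some (f a) else none)
      = (l.filter (fun a => decide (p a))).map f := by
  intro l
  induction l with
  | nil => rfl
  | cons a l ih =>
    by_cases h : p a <;> simp [h, ih]

-- folding B's inserts over one block is A's inner loop over the terms
theorem pv_block_fold (d : List (String × List Int)) (i : Int) :
    ((pvBlock d i).foldl (fun dic e => dic.insert e.2.2.1 e.2.2.2) PySem.Dict.empty).items
      = (d.foldl
          (fun dic kv =>
            if 0 < PySem.List.pyGetD kv.2 i 0 then dic.insert kv.1 (PySem.List.pyGetD kv.2 i 0) else dic)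
          PySem.Dict.empty).items := by
  rw [pvBlock,
    pv_filterMap_if (fun pe : Int × String × List Int => 0 < PySem.List.pyGetD pe.2.2 i 0)
      (fun pe : Int × String × List Int => (i, pe.1, pe.2.1, PySem.List.pyGetD pe.2.2 i 0))
      (PySem.List.enumerate d),
    List.foldl_map,
    ← PySem.List.foldl_ite_eq_foldl_filter
      (fun pe : Int × String × List Int => 0 < PySem.List.pyGetD pe.2.2 i 0)
      (fun dic (pe : Int × String × List Int) => dic.insert pe.2.1 (PySem.List.pyGetD pe.2.2 i 0))
      (PySem.List.enumerate d) PySem.Dict.empty]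
  conv_rhs => rw [← PySem.List.map_snd_enumerate d 0, List.foldl_map]

-- ===== VERDICT (by name: the statement is the Claim_ definition above) =====
theorem abstract_tf_spec : Claim_equal_abstract_tf := by
  intro d n hdom hpre
  show abstract_tf d n = abstract_tf_alt d n
  have hA : abstract_tf d n
      = (PySem.List.pyRange 0 n 1).map (fun i =>
          (d.foldl
            (fun dic kv =>
              if 0 < PySem.List.pyGetD kv.2 i 0 then dic.insert kv.1 (PySem.List.pyGetD kv.2 i 0) else dic)
            PySem.Dict.empty).items) := by
    simp only [abstract_tf, gt_iff_lt, PySem.List.foldl_append_singleton_eq_map, List.nil_append]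
  have hB : abstract_tf_alt d n
      = (PySem.List.pyRange 0 n 1).map (fun k =>
          ((pvBlock d k).foldl (fun dic e => dic.insert e.2.2.1 e.2.2.2) PySem.Dict.empty).items) := by
    simp only [abstract_tf_alt]
    rw [pv_sorted_events d n]
    simp only [pvYs]
    rw [pv_sweep_fold (pvBlock d) (PySem.List.pyRange 0 n 1) []
      (PySem.List.nodup_pyRange_one 0 n)
      (fun k _ e he => (pv_mem_pvBlock he).1)]
    simp
  rw [hA, hB]
  refine List.map_congr_left ?_
  intro k _
  exact (pv_block_fold d k).symm
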